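-- pv_equiv track=rewrite | github.com/Nourshosharah/AI-invoice-Understanding | src/extraction/invoice_parser.py | _detect_column_breaks_from_text
-- ===== SOURCE A (Python) =====
-- from typing import List, Dict, Any, Optional, Tuple
--
-- def _detect_column_breaks_from_text(header_text: str) -> List[int]:
--     """
--     Detect column boundaries from header text using whitespace patterns.
--
--     Looks for multiple spaces that indicate column separations.
--     """
--     if not header_text:
--         return []
--
--     # Find positions of multiple consecutive spaces (column separators)
--     column_breaks = [0]  # Start from beginning
--
--     # Track positions of significant whitespace gaps
--     in_whitespace = False
--     current_start = 0
--
--     for i, char in enumerate(header_text):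
--         if char == ' ':
--             if not in_whitespace:
--                 in_whitespace = True
--                 current_start = i
--         else:
--             if in_whitespace:
--                 # End of whitespace sequence
--                 gap_size = i - current_start
--                 if gap_size >= 2:  # Significant gap indicates column break
--                     # Position is in the middle of the gap
--                     column_breaks.append(current_start + gap_size // 2)
--                 in_whitespace = False
--
--     # Add end position
--     column_breaks.append(len(header_text))
--
--     # Remove duplicates and sort
--     column_breaks = sorted(list(set(column_breaks)))
--
--     return column_breaks
-- ===== SOURCE B (Python) =====
-- def _detect_column_breaks_from_text(header_text: str):
--     """Column breaks = 0, the midpoint of each internal run of >=2 spaces, and len.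
--
--     Declarative re-implementation: run starts/ends via comprehensions + zip,
--     output built already sorted and duplicate-free (no set/sorted pass).
--     """
--     if not header_text:
--         return []
--     n = len(header_text)
--     is_sp = [c == ' ' for c in header_text]
--     starts = [i for i in range(n) if is_sp[i] and (i == 0 or not is_sp[i - 1])]
--     ends = [i for i in range(n) if not is_sp[i] and i > 0 and is_sp[i - 1]]
--     # zip drops a trailing space run (it has no end), like A, which only
--     # records a run when a non-space character follows it
--     mids = [s + (e - s) // 2 for s, e in zip(starts, ends) if e - s >= 2]
--     return [0] + mids + [n]
-- ===== Notes on version B (the rewrite author's own statement) =====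
-- stated objective: alternative
-- what changed: Replaces A's in_whitespace/current_start state machine plus a final sorted(set(...)) pass by a declarative formulation: run starts and run ends are found as two index-range comprehensions, zipped into runs (a trailing space run has no end and is dropped by zip, as in A), and the result is emitted already sorted and duplicate-free with no set or sort.
import Mathlib
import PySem

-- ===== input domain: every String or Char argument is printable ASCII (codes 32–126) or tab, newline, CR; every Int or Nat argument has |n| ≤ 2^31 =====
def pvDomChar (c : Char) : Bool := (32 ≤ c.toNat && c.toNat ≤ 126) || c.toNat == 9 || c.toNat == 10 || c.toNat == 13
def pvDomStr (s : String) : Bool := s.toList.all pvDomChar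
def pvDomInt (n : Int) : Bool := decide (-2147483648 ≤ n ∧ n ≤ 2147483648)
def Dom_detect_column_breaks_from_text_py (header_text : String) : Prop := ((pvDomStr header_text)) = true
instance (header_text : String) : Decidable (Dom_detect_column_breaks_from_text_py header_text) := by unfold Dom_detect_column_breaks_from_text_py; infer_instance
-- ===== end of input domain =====

-- B replaces A's in_whitespace/current_start state machine and trailing sorted(set(...)) pass by
-- declarative run detection (run starts and ends as filters over the index range, zipped), emitting
-- the breaks already sorted and duplicate-free; objective: simpler/alternative, not faster.

-- ===== PORT A =====
-- the loop body of A's `for i, char in enumerate(header_text)` (state: (column_breaks, in_whitespace, current_start))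
def pvAStep (st : List Int × Bool × Int) (p : Int × Char) : List Int × Bool × Int :=
  if p.2 = ' ' then
    if st.2.1 = false then (st.1, true, p.1) else st
  else
    if st.2.1 = true then
      (if 2 ≤ p.1 - st.2.2 then st.1 ++ [st.2.2 + PySem.Int.floordiv (p.1 - st.2.2) 2] else st.1,
       false, st.2.2)
    else st

def detect_column_breaks_from_text_py (header_text : String) : List Int :=
  if header_text.toList = [] then []
  else
    let cs := header_text.toList
    let st := (PySem.List.enumerate cs 0).foldl pvAStep ([0], false, 0)
    -- column_breaks.append(len(header_text)); sorted(list(set(column_breaks)))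
    PySem.List.sorted (PySem.Set.ofList (st.1 ++ [(cs.length : Int)])) (fun x => x) false

-- ===== PORT B =====
def detect_column_breaks_from_text_py_alt (header_text : String) : List Int :=
  if header_text.toList = [] then []
  else
    let cs := header_text.toList
    let n := cs.length
    let is_sp := cs.map (fun c => decide (c = ' '))
    -- indices i drawn from range(n) are in bounds, so `getD … false` is exact Python list indexing
    let starts := (List.range n).filter
      (fun i => is_sp.getD i false && (decide (i = 0) || !(is_sp.getD (i - 1) false)))
    let ends := (List.range n).filter
      (fun i => !(is_sp.getD i false) && decide (0 < i) && is_sp.getD (i - 1) false)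
    let mids := ((starts.zip ends).filter (fun p => decide (2 ≤ (p.2 : Int) - (p.1 : Int)))).map
      (fun p => (p.1 : Int) + PySem.Int.floordiv ((p.2 : Int) - (p.1 : Int)) 2)
    [0] ++ mids ++ [(n : Int)]

-- ===== PRECONDITION & SPEC =====
def Spec_detect_column_breaks_from_text_py (header_text : String) (out : List Int) : Prop := out = detect_column_breaks_from_text_py_alt header_text
instance (header_text : String) (out : List Int) : Decidable (Spec_detect_column_breaks_from_text_py header_text out) := by unfold Spec_detect_column_breaks_from_text_py; infer_instance

-- ===== CLAIM (what is proved, stated in full; the proofs are below) =====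
def Claim_equal_detect_column_breaks_from_text_py : Prop := ∀ (header_text : String), Dom_detect_column_breaks_from_text_py header_text → Spec_detect_column_breaks_from_text_py header_text (detect_column_breaks_from_text_py header_text)

-- ===== LEMMAS AND PROOFS =====

-- reference: the midpoints of completed runs of ≥2 spaces, scanned left to right
def pvMids : List Bool → Bool → Int → Int → List Int
  | [], _, _, _ => []
  | b :: r, prev, i, st =>
    if b then pvMids r true (i + 1) (if prev then st else i)
    else if prev then
      (if 2 ≤ i - st then [st + PySem.Int.floordiv (i - st) 2] else []) ++ pvMids r false (i + 1) st
    else pvMids r false (i + 1) st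

-- reference: positions i where f (bs[i]) (bs[i-1], false at i=0) holds
def pvScan (f : Bool → Bool → Bool) : List Bool → Bool → Nat → List Nat
  | [], _, _ => []
  | b :: r, prev, i => (if f b prev then [i] else []) ++ pvScan f r b (i + 1)

theorem pvScan_shift (f : Bool → Bool → Bool) (bs : List Bool) (prev : Bool) (i : Nat) :
    pvScan f bs prev i = (pvScan f bs prev 0).map (· + i) := by
  induction bs generalizing prev i with
  | nil => simp [pvScan]
  | cons b r ih =>
    simp only [pvScan]
    rw [ih b (i + 1), ih b 1]
    rw [List.map_append, List.map_map]
    congr 1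
    · split <;> simp
    · apply List.map_congr_left; intro j _; simp; omega

theorem pvScan_filter (f : Bool → Bool → Bool) (bs : List Bool) (prev : Bool) :
    (List.range bs.length).filter
      (fun i => f (bs.getD i false) (if i = 0 then prev else bs.getD (i - 1) false))
      = pvScan f bs prev 0 := by
  induction bs generalizing prev with
  | nil => simp [pvScan]
  | cons b r ih =>
    rw [List.length_cons, List.range_succ_eq_map, List.filter_cons]
    simp only [pvScan]
    have hmap : (List.filter
        (fun i => f ((b :: r).getD i false) (if i = 0 then prev else (b :: r).getD (i - 1) false))
        ((List.range r.length).map Nat.succ))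
        = ((List.range r.length).filter
            (fun j => f (r.getD j false) (if j = 0 then b else r.getD (j - 1) false))).map Nat.succ := by
      rw [List.filter_map]
      congr 1
      apply List.filter_congr
      intro j hj
      simp only [Function.comp]
      have : (Nat.succ j) - 1 = j := rfl
      rcases j with _ | j <;> simp [List.getD]
    rw [hmap, ih b, pvScan_shift f r b 1]
    have hsucc : List.map Nat.succ (pvScan f r b 0) = List.map (· + 1) (pvScan f r b 0) := by
      apply List.map_congr_left; intro j _; omega
    by_cases hc : f b prev = true <;> simp [hc, hsucc]

-- B's zip-of-starts-and-ends computation, as in the port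
def pvZipMids (ss es : List Nat) : List Int :=
  ((ss.zip es).filter (fun p => decide (2 ≤ (p.2 : Int) - (p.1 : Int)))).map
    (fun p => (p.1 : Int) + PySem.Int.floordiv ((p.2 : Int) - (p.1 : Int)) 2)

def pvFS : Bool → Bool → Bool := fun b p => b && !p
def pvFE : Bool → Bool → Bool := fun b p => !b && p

theorem pvZip_runs (bs : List Bool) (prev : Bool) (i st : Nat) :
    pvZipMids ((if prev then [st] else []) ++ pvScan pvFS bs prev i) (pvScan pvFE bs prev i)
      = pvMids bs prev (i : Int) (st : Int) := by
  induction bs generalizing prev i st with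
  | nil =>
    cases prev <;> simp [pvScan, pvZipMids, pvMids]
  | cons b r ih =>
    cases prev <;> cases b <;>
      simp only [pvScan, pvFS, pvFE, pvMids, Bool.not_false, Bool.not_true, Bool.and_true,
        Bool.and_false, Bool.true_and, Bool.false_and, if_true, if_false, List.nil_append,
        List.singleton_append, ite_true, ite_false]
    · -- prev = false, b = false
      have := ih false (i + 1) st
      simpa [Nat.cast_add] using this
    · -- prev = false, b = true : current run starts at i
      have := ih true (i + 1) i
      simpa [Nat.cast_add] using this
    · -- prev = true, b = false : run (st, i) completes
      have tail := ih false (i + 1) st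
      simp only [pvZipMids, List.zip_cons_cons, List.filter_cons, List.map_cons] at *
      by_cases h : 2 ≤ (i : Int) - (st : Int) <;>
        simp [h, tail, Nat.cast_add] <;> simpa [Nat.cast_add] using tail
    · -- prev = true, b = true
      have := ih true (i + 1) st
      simpa [Nat.cast_add] using this

theorem pvFoldA (cs : List Char) (acc : List Int) (inws : Bool) (i st : Int) :
    ((PySem.List.enumerate cs i).foldl pvAStep (acc, inws, st)).1
      = acc ++ pvMids (cs.map (fun c => decide (c = ' '))) inws i st := by
  induction cs generalizing acc inws i st with
  | nil => simp [PySem.List.enumerate_nil, pvMids]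
  | cons c r ih =>
    rw [PySem.List.enumerate_cons, List.foldl_cons]
    by_cases hc : c = ' '
    · cases inws <;> simp [pvAStep, hc, pvMids, ih]
    · cases inws
      · simp [pvAStep, hc, pvMids, ih]
      · by_cases hg : 2 ≤ i - st <;>
          simp [pvAStep, hc, pvMids, ih, hg, List.append_assoc]

-- bounds and strict monotonicity of the midpoints
theorem pvMids_mono (bs : List Bool) (prev : Bool) (i st : Int) (h : prev = true → st < i) :
    (pvMids bs prev i st).Pairwise (· < ·)
      ∧ ∀ m ∈ pvMids bs prev i st, (if prev then st else i) < m ∧ m < i + bs.length := by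
  induction bs generalizing prev i st with
  | nil => simp [pvMids]
  | cons b r ih =>
    cases b <;> cases prev <;> simp only [pvMids, if_true, if_false, ite_true, ite_false]
    · -- b = false, prev = false
      have ⟨h1, h2⟩ := ih false (i + 1) st (by simp)
      refine ⟨h1, fun m hm => ?_⟩
      have := h2 m hm
      simp at this ⊢
      omega
    · -- b = false, prev = true : may emit
      have hst := h rfl
      have ⟨h1, h2⟩ := ih false (i + 1) st (by simp)
      by_cases hg : 2 ≤ i - st
      · have hfde : PySem.Int.floordiv (i - st) 2 = (i - st) / 2 :=
          PySem.Int.floordiv_eq_ediv_of_pos (by omega)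
        have hfd1 : 1 ≤ PySem.Int.floordiv (i - st) 2 := by rw [hfde]; omega
        have hfd2 : PySem.Int.floordiv (i - st) 2 ≤ i - st - 1 := by rw [hfde]; omega
        simp only [hg, ite_true, List.singleton_append]
        constructor
        · refine List.pairwise_cons.mpr ⟨fun m hm => ?_, h1⟩
          have := (h2 m hm).1
          simp at this
          omega
        · intro m hm
          rcases List.mem_cons.mp hm with rfl | hm'
          · simp; omega
          · have := h2 m hm'
            simp at this ⊢
            omega
      · simp only [hg, ite_false, List.nil_append]
        refine ⟨h1, fun m hm => ?_⟩
        have := h2 m hm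
        simp at this ⊢
        omega
    · -- b = true, prev = false : run starts at i
      have ⟨h1, h2⟩ := ih true (i + 1) i (by intro; omega)
      refine ⟨h1, fun m hm => ?_⟩
      have := h2 m hm
      simp at this ⊢
      omega
    · -- b = true, prev = true
      have hst := h rfl
      have ⟨h1, h2⟩ := ih true (i + 1) st (by intro; omega)
      refine ⟨h1, fun m hm => ?_⟩
      have := h2 m hm
      simp at this ⊢
      omega

-- ===== VERDICT (by name: the statement is the Claim_ definition above) =====
theorem detect_column_breaks_from_text_py_spec : Claim_equal_detect_column_breaks_from_text_py := by
  intro s _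
  unfold Spec_detect_column_breaks_from_text_py
  unfold detect_column_breaks_from_text_py detect_column_breaks_from_text_py_alt
  by_cases h : s.toList = []
  · simp [h]
  · simp only [h, if_false]
    have hA := pvFoldA s.toList [0] false 0 0
    rw [hA]
    set bs := s.toList.map (fun c => decide (c = ' ')) with hbs
    set M := pvMids bs false 0 0 with hM
    have hlen : bs.length = s.toList.length := by simp [hbs]
    have hstarts : (List.range s.toList.length).filter
        (fun i => bs.getD i false && (decide (i = 0) || !(bs.getD (i - 1) false)))
        = pvScan pvFS bs false 0 := by
      rw [← hlen, ← pvScan_filter pvFS bs false]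
      apply List.filter_congr
      intro i _
      rcases i with _ | i <;> simp [pvFS]
    have hends : (List.range s.toList.length).filter
        (fun i => !(bs.getD i false) && decide (0 < i) && bs.getD (i - 1) false)
        = pvScan pvFE bs false 0 := by
      rw [← hlen, ← pvScan_filter pvFE bs false]
      apply List.filter_congr
      intro i _
      rcases i with _ | i <;> simp [pvFE]
    have hzip : pvZipMids (pvScan pvFS bs false 0) (pvScan pvFE bs false 0) = M := by
      have := pvZip_runs bs false 0 0
      simpa using this
    obtain ⟨h1, h2⟩ := pvMids_mono bs false 0 0 (by simp)
    have hn : 0 < s.toList.length := List.length_pos_iff.mpr h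
    have hpw : ((0 : Int) :: (M ++ [(s.toList.length : Int)])).Pairwise (· < ·) := by
      refine List.pairwise_cons.mpr ⟨?_, ?_⟩
      · intro y hy
        rcases List.mem_append.mp hy with hy' | hy'
        · have := (h2 y hy').1
          simpa using this
        · simp only [List.mem_singleton] at hy'
          subst hy'
          exact_mod_cast hn
      · refine List.pairwise_append.mpr ⟨h1, by simp, ?_⟩
        intro a ha b hb
        simp only [List.mem_singleton] at hb
        subst hb
        have := (h2 a ha).2
        simpa [hlen] using this
    have hnd : ((0 : Int) :: (M ++ [(s.toList.length : Int)])).Nodup :=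
      hpw.imp (fun hab => ne_of_lt hab)
    have hperm : ((0 : Int) :: (M ++ [(s.toList.length : Int)])).Perm
        (PySem.Set.ofList (([0] ++ M) ++ [(s.toList.length : Int)])) := by
      refine (List.perm_ext_iff_of_nodup hnd (PySem.Set.nodup_ofList _)).mpr ?_
      intro a
      simp [PySem.Set.mem_ofList]
    have hsorted : PySem.List.sorted (PySem.Set.ofList ([0] ++ M ++ [(s.toList.length : Int)]))
        (fun x => x) false = (0 : Int) :: (M ++ [(s.toList.length : Int)]) :=
      PySem.List.sorted_eq_of_perm_of_pairwise_lt _ _ _ hperm hpw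
    rw [hsorted, hstarts, hends]
    show (0 : Int) :: (M ++ [(s.toList.length : Int)])
        = [0] ++ pvZipMids (pvScan pvFS bs false 0) (pvScan pvFE bs false 0) ++ [(s.toList.length : Int)]
    rw [hzip]
    simp
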